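-- pv_equiv track=rewrite | github.com/aviswerdlow/k4 | archive/03_SOLVERS/v5_2_2_B/scripts/boundary_tokenizer.py | _tokenize_segment
-- ===== SOURCE A (Python) =====
-- from typing import List, Tuple, Set
--
-- FUNCTION_WORDS = {
--     'THE', 'OF', 'AND', 'TO', 'IN', 'IS', 'ARE', 'WAS',
--     'THEN', 'THERE', 'HERE', 'WITH', 'AT', 'BY', 'WE'
-- }
--
-- VERBS = {
--     'SET', 'READ', 'SIGHT', 'NOTE', 'OBSERVE', 'FOLLOW',
--     'APPLY', 'BRING', 'REDUCE', 'CORRECT', 'TRACE', 'FIND',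
--     'MARK', 'SEE'
-- }
--
-- def _tokenize_segment(segment: str) -> List[str]:
--     """
--     Tokenize a segment by recognizing known words.
--     This handles cases where multiple words are fused in a segment.
--     """
--
--     segment = segment.upper()
--     tokens = []
--
--     # Known vocabulary (combine function words and verbs for recognition)
--     known_words = FUNCTION_WORDS | VERBS | {
--         'DIAL', 'LINE', 'GRID', 'MARK', 'ARC', 'ANGLE', 'POINT',
--         'COURSE', 'BEARING', 'MERIDIAN', 'STATION', 'FIELD',
--         'EAST', 'NORTHEAST', 'BERLINCLOCK', 'CLOCK', 'BERLIN',
--         'TRUE', 'MAGNETIC', 'DECLINATION'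
--     }
--
--     # Greedy tokenization - try to match longest known words first
--     i = 0
--     while i < len(segment):
--         # Try progressively shorter matches
--         matched = False
--         for length in range(min(15, len(segment) - i), 0, -1):
--             candidate = segment[i:i + length]
--             if candidate in known_words:
--                 tokens.append(candidate)
--                 i += length
--                 matched = True
--                 break
--
--         if not matched:
--             # No known word found, take single character
--             # This shouldn't happen with well-formed text
--             if i < len(segment):
--                 # Look ahead to find next known word boundary
--                 j = i + 1
--                 while j < len(segment):
--                     if segment[i:j] in known_words:
--                         tokens.append(segment[i:j])
--                         i = j
--                         matched = True
--                         break
--                     j += 1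
--
--                 if not matched:
--                     # Take rest as unknown token
--                     tokens.append(segment[i:])
--                     break
--
--     return tokens
-- ===== SOURCE B (Python) =====
-- FUNCTION_WORDS_T = (
--     'THE', 'OF', 'AND', 'TO', 'IN', 'IS', 'ARE', 'WAS',
--     'THEN', 'THERE', 'HERE', 'WITH', 'AT', 'BY', 'WE'
-- )
--
-- VERBS_T = (
--     'SET', 'READ', 'SIGHT', 'NOTE', 'OBSERVE', 'FOLLOW',
--     'APPLY', 'BRING', 'REDUCE', 'CORRECT', 'TRACE', 'FIND',
--     'MARK', 'SEE'
-- )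
--
-- EXTRA_T = (
--     'DIAL', 'LINE', 'GRID', 'MARK', 'ARC', 'ANGLE', 'POINT',
--     'COURSE', 'BEARING', 'MERIDIAN', 'STATION', 'FIELD',
--     'EAST', 'NORTHEAST', 'BERLINCLOCK', 'CLOCK', 'BERLIN',
--     'TRUE', 'MAGNETIC', 'DECLINATION'
-- )
--
-- VOCAB = FUNCTION_WORDS_T + VERBS_T + EXTRA_T
--
--
-- def _tokenize_segment(segment):
--     seg = segment.upper()
--     tokens = []
--     i = 0
--     n = len(seg)
--     while i < n:
--         # single scan over the vocabulary: longest word starting at i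
--         best = None
--         for w in VOCAB:
--             if seg.startswith(w, i) and (best is None or len(best) < len(w)):
--                 best = w
--         if best is None:
--             tokens.append(seg[i:])
--             break
--         tokens.append(best)
--         i += len(best)
--     return tokens
-- ===== Notes on version B (the rewrite author's own statement) =====
-- stated objective: simpler
-- what changed: Per position, B does one scan over the vocabulary list keeping the longest word that starts there (startswith), replacing A's descending candidate-length loop of substring/set-membership tests and dropping A's dead look-ahead loop, which scans the whole remaining tail before emitting the remainder.
import Mathlib
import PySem

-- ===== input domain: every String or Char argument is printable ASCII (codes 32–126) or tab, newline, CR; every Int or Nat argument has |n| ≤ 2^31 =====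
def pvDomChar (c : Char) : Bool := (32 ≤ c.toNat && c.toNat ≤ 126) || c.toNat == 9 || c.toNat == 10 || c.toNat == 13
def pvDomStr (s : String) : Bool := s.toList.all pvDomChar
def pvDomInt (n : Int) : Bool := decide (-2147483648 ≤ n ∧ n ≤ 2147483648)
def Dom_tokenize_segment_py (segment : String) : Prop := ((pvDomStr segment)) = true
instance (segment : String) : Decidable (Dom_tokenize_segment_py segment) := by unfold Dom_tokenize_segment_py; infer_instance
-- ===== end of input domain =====

-- B replaces A's per-length substring/set-membership loops by one scan over the vocabulary
-- keeping the longest word that starts at the current position, and drops A's dead look-ahead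
-- loop (which rescans the whole tail before emitting the remainder; a timing run measured B faster).

-- the word lists, as lists of characters (shared data of both ports)
def pvFunctionWords : List (List Char) :=
  ["THE".toList, "OF".toList, "AND".toList, "TO".toList, "IN".toList, "IS".toList,
   "ARE".toList, "WAS".toList, "THEN".toList, "THERE".toList, "HERE".toList,
   "WITH".toList, "AT".toList, "BY".toList, "WE".toList]
def pvVerbs : List (List Char) :=
  ["SET".toList, "READ".toList, "SIGHT".toList, "NOTE".toList, "OBSERVE".toList,
   "FOLLOW".toList, "APPLY".toList, "BRING".toList, "REDUCE".toList, "CORRECT".toList,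
   "TRACE".toList, "FIND".toList, "MARK".toList, "SEE".toList]
def pvExtra : List (List Char) :=
  ["DIAL".toList, "LINE".toList, "GRID".toList, "MARK".toList, "ARC".toList,
   "ANGLE".toList, "POINT".toList, "COURSE".toList, "BEARING".toList, "MERIDIAN".toList,
   "STATION".toList, "FIELD".toList, "EAST".toList, "NORTHEAST".toList,
   "BERLINCLOCK".toList, "CLOCK".toList, "BERLIN".toList, "TRUE".toList,
   "MAGNETIC".toList, "DECLINATION".toList]

-- ===== PORT A =====
-- known_words = FUNCTION_WORDS | VERBS | {...}  (a Python set; membership-only use)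
def knownA : PySem.Set (List Char) :=
  PySem.Set.ofList (pvFunctionWords ++ pvVerbs ++ pvExtra)

-- inner 'for length in range(min(15, len - i), 0, -1)' on the suffix cs
def findA (cs : List Char) : Nat → Option Nat
  | 0 => none
  | (l+1) => if cs.take (l+1) ∈ knownA then some (l+1) else findA cs l

-- look-ahead loop: 'j = i + 1; while j < len: if segment[i:j] in known_words: …; j += 1'
-- (k = j - i is the candidate length)
def lookA (cs : List Char) (k : Nat) : Option Nat :=
  if _h : cs.length ≤ k then none
  else if cs.take k ∈ knownA then some k else lookA cs (k+1)
termination_by cs.length - k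
decreasing_by omega

theorem findA_pos {cs : List Char} {m l : Nat} (h : findA cs m = some l) : 1 ≤ l := by
  induction m with
  | zero => simp [findA] at h
  | succ m ih =>
    unfold findA at h
    split at h
    · injection h with h'; omega
    · exact ih h

theorem lookA_ge {cs : List Char} {k l : Nat} (h : lookA cs k = some l) : k ≤ l := by
  generalize hn : cs.length - k = n at *
  induction n generalizing k with
  | zero => unfold lookA at h; rw [dif_pos (by omega)] at h; exact absurd h (by simp)
  | succ n ih =>
    unfold lookA at h
    rw [dif_neg (by omega)] at h
    split at h
    · injection h with h'; omega
    · have := ih (k := k+1) h (by omega); omega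

-- the while loop of A, over the remaining suffix cs (i-advance = drop)
def loopA (cs : List Char) (acc : List String) : List String :=
  if h : cs = [] then acc.reverse
  else
    match hf : findA cs (min 15 cs.length) with
    | some l => loopA (cs.drop l) (String.ofList (cs.take l) :: acc)
    | none =>
      match hl : lookA cs 1 with
      | some j => loopA (cs.drop j) (String.ofList (cs.take j) :: acc)
      | none => (String.ofList cs :: acc).reverse
termination_by cs.length
decreasing_by
  · have h1 := findA_pos hf
    have : cs.length ≠ 0 := fun hz => h (List.eq_nil_of_length_eq_zero hz)
    simp only [List.length_drop]; omega
  · have h1 := lookA_ge hl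
    have : cs.length ≠ 0 := fun hz => h (List.eq_nil_of_length_eq_zero hz)
    simp only [List.length_drop]; omega

def tokenize_segment_py (segment : String) : List String :=
  loopA (PySem.Str.upper segment).toList []

-- ===== PORT B =====
def vocabB : List (List Char) := pvFunctionWords ++ pvVerbs ++ pvExtra

-- the body of B's for-loop: 'if seg.startswith(w, i) and (best is None or len(best) < len(w)): best = w'
def stepB (cs w : List Char) (best : Option (List Char)) : Option (List Char) :=
  if w.isPrefixOf cs && best.all (fun b => decide (b.length < w.length))
  then some w else best

-- 'for w in VOCAB: …'
def bestB (ws : List (List Char)) (best : Option (List Char)) (cs : List Char) :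
    Option (List Char) :=
  match ws with
  | [] => best
  | w :: ws => bestB ws (stepB cs w best) cs

theorem stepB_or {cs w : List Char} {best : Option (List Char)} :
    stepB cs w best = some w ∨ stepB cs w best = best := by
  unfold stepB
  split
  · exact Or.inl rfl
  · exact Or.inr rfl

theorem bestB_mem {ws : List (List Char)} {best : Option (List Char)} {cs v : List Char}
    (h : bestB ws best cs = some v) : best = some v ∨ v ∈ ws := by
  induction ws generalizing best with
  | nil => exact Or.inl h
  | cons w ws ih =>
    rcases ih h with h' | h'
    · rcases stepB_or (cs := cs) (w := w) (best := best) with hs | hs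
      · rw [hs] at h'
        injection h' with h''
        exact Or.inr (List.mem_cons.2 (Or.inl h''.symm))
      · rw [hs] at h'; exact Or.inl h'
    · exact Or.inr (List.mem_cons_of_mem _ h')

theorem vocabB_len : ∀ w ∈ vocabB, 1 ≤ w.length ∧ w.length ≤ 15 := by decide

-- B's while loop over the remaining suffix
def loopB (cs : List Char) : List String :=
  if h : cs = [] then []
  else
    match hb : bestB vocabB none cs with
    | none => [String.ofList cs]
    | some v => String.ofList v :: loopB (cs.drop v.length)
termination_by cs.length
decreasing_by
  have hv : v ∈ vocabB := by
    rcases bestB_mem hb with h' | h'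
    · exact absurd h' (by simp)
    · exact h'
  have h1 := (vocabB_len v hv).1
  have : cs.length ≠ 0 := fun hz => h (List.eq_nil_of_length_eq_zero hz)
  simp only [List.length_drop]; omega

def tokenize_segment_py_alt (segment : String) : List String :=
  loopB (PySem.Str.upper segment).toList

-- ===== PRECONDITION & SPEC =====
def Spec_tokenize_segment_py (segment : String) (out : List String) : Prop := out = tokenize_segment_py_alt segment
instance (segment : String) (out : List String) : Decidable (Spec_tokenize_segment_py segment out) := by unfold Spec_tokenize_segment_py; infer_instance

-- ===== CLAIM (what is proved, stated in full; the proofs are below) =====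
def Claim_equal_tokenize_segment_py : Prop := ∀ (segment : String), Dom_tokenize_segment_py segment → Spec_tokenize_segment_py segment (tokenize_segment_py segment)

-- ===== LEMMAS AND PROOFS =====

theorem mem_knownA_iff {w : List Char} : w ∈ knownA ↔ w ∈ vocabB := by
  unfold knownA vocabB
  exact PySem.Set.mem_ofList (pvFunctionWords ++ pvVerbs ++ pvExtra) w

theorem loopA_some {cs : List Char} {acc : List String} {l : Nat} (h : cs ≠ [])
    (hf : findA cs (min 15 cs.length) = some l) :
    loopA cs acc = loopA (cs.drop l) (String.ofList (cs.take l) :: acc) := by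
  rw [loopA, dif_neg h]
  split
  · rename_i l' heq
    rw [hf] at heq
    have h' : l = l' := Option.some.inj heq
    subst h'
    rfl
  · rename_i heq
    rw [hf] at heq
    cases heq

theorem loopA_none {cs : List Char} {acc : List String} (h : cs ≠ [])
    (hf : findA cs (min 15 cs.length) = none) (hl : lookA cs 1 = none) :
    loopA cs acc = (String.ofList cs :: acc).reverse := by
  rw [loopA, dif_neg h]
  split
  · rename_i l' heq
    rw [hf] at heq
    cases heq
  · split
    · rename_i j heq
      rw [hl] at heq
      cases heq
    · rfl

theorem loopB_some {cs v : List Char} (h : cs ≠ [])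
    (hb : bestB vocabB none cs = some v) :
    loopB cs = String.ofList v :: loopB (cs.drop v.length) := by
  rw [loopB, dif_neg h]
  split
  · rename_i heq
    rw [hb] at heq
    cases heq
  · rename_i v' heq
    rw [hb] at heq
    have h' : v = v' := Option.some.inj heq
    subst h'
    rfl

theorem loopB_none {cs : List Char} (h : cs ≠ [])
    (hb : bestB vocabB none cs = none) :
    loopB cs = [String.ofList cs] := by
  rw [loopB, dif_neg h]
  split
  · rfl
  · rename_i v' heq
    rw [hb] at heq
    cases heq

theorem stepB_prefix {cs w : List Char} {best : Option (List Char)}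
    (h : stepB cs w best = some w) (hne : best ≠ some w) : w <+: cs := by
  unfold stepB at h
  split at h
  · rename_i hc
    simp only [Bool.and_eq_true] at hc
    exact (List.isPrefixOf_iff_prefix).1 hc.1
  · exact absurd h hne

theorem stepB_mono {cs w u : List Char} {best : Option (List Char)}
    (h : best = some u) : ∃ u', stepB cs w best = some u' ∧ u.length ≤ u'.length := by
  subst h
  unfold stepB
  split
  · rename_i hc
    simp only [Option.all_some, Bool.and_eq_true, decide_eq_true_eq] at hc
    exact ⟨w, rfl, by omega⟩
  · exact ⟨u, rfl, le_refl _⟩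

theorem stepB_dom {cs w : List Char} {best : Option (List Char)} (hp : w <+: cs) :
    ∃ u, stepB cs w best = some u ∧ w.length ≤ u.length := by
  have hpre : w.isPrefixOf cs = true := (List.isPrefixOf_iff_prefix).2 hp
  unfold stepB
  cases best with
  | none =>
    rw [if_pos (by simp [hpre])]
    exact ⟨w, rfl, le_refl _⟩
  | some b =>
    by_cases hlt : b.length < w.length
    · rw [if_pos (by simp [hpre, hlt])]
      exact ⟨w, rfl, le_refl _⟩
    · rw [if_neg (by simp [hpre, hlt])]
      exact ⟨b, rfl, by omega⟩

-- what B's scan returns: the (unique) longest vocabulary word that prefixes cs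
theorem bestB_spec (ws : List (List Char)) (best : Option (List Char)) (cs : List Char) :
    (bestB ws best cs = best ∨ ∃ v ∈ ws, bestB ws best cs = some v ∧ v <+: cs) ∧
    (∀ w ∈ ws, w <+: cs → ∃ v, bestB ws best cs = some v ∧ w.length ≤ v.length) ∧
    (∀ u, best = some u → ∃ v, bestB ws best cs = some v ∧ u.length ≤ v.length) := by
  induction ws generalizing best with
  | nil =>
    refine ⟨Or.inl rfl, by simp, ?_⟩
    intro u hu; exact ⟨u, hu, le_refl _⟩
  | cons w ws ih =>
    obtain ⟨ih1, ih2, ih3⟩ := ih (stepB cs w best)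
    have hstep : bestB (w :: ws) best cs = bestB ws (stepB cs w best) cs := rfl
    rw [hstep]
    refine ⟨?_, ?_, ?_⟩
    · rcases ih1 with h' | ⟨v, hv, hr, hp⟩
      · rcases stepB_or (cs := cs) (w := w) (best := best) with hs | hs
        · by_cases hbw : best = some w
          · exact Or.inl (by rw [h', hs, hbw])
          · exact Or.inr ⟨w, by simp, by rw [h', hs], stepB_prefix hs hbw⟩
        · exact Or.inl (by rw [h', hs])
      · exact Or.inr ⟨v, List.mem_cons_of_mem _ hv, hr, hp⟩
    · intro x hx hxp
      rcases List.mem_cons.1 hx with rfl | hx'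
      · obtain ⟨u, hu, hle⟩ := stepB_dom (best := best) hxp
        obtain ⟨v, hv, hle'⟩ := ih3 u hu
        exact ⟨v, hv, by omega⟩
      · exact ih2 x hx' hxp
    · intro u hu
      obtain ⟨u', hu', huu⟩ := stepB_mono (cs := cs) (w := w) hu
      obtain ⟨v, hv, hle⟩ := ih3 u' hu'
      exact ⟨v, hv, by omega⟩

theorem bestB_none {cs : List Char} (h : bestB vocabB none cs = none) :
    ∀ w ∈ vocabB, ¬ w <+: cs := by
  intro w hw hp
  obtain ⟨v, hv, _⟩ := (bestB_spec vocabB none cs).2.1 w hw hp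
  rw [h] at hv; exact absurd hv (by simp)

theorem bestB_some {cs v : List Char} (h : bestB vocabB none cs = some v) :
    v ∈ vocabB ∧ v <+: cs ∧ ∀ w ∈ vocabB, w <+: cs → w.length ≤ v.length := by
  have hmem : v ∈ vocabB ∧ v <+: cs := by
    rcases (bestB_spec vocabB none cs).1 with h' | ⟨u, hu, hr, hp⟩
    · rw [h] at h'; exact absurd h' (by simp)
    · rw [h] at hr
      have h' : u = v := (Option.some.inj hr).symm
      subst h'
      exact ⟨hu, hp⟩
  refine ⟨hmem.1, hmem.2, ?_⟩
  intro w hw hp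
  obtain ⟨u, hu, hle⟩ := (bestB_spec vocabB none cs).2.1 w hw hp
  rw [h] at hu
  have h' : u = v := (Option.some.inj hu).symm
  subst h'
  exact hle

theorem findA_some {cs : List Char} {m l : Nat} (h : findA cs m = some l) :
    l ≤ m ∧ cs.take l ∈ knownA := by
  induction m with
  | zero => simp [findA] at h
  | succ m ih =>
    unfold findA at h
    split at h
    · rename_i hc
      have : m + 1 = l := by injection h
      subst this
      exact ⟨le_refl _, hc⟩
    · have := ih h; exact ⟨by omega, this.2⟩

theorem lookA_some {cs : List Char} {k l : Nat} (h : lookA cs k = some l) :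
    cs.take l ∈ knownA := by
  generalize hn : cs.length - k = n at *
  induction n generalizing k with
  | zero => unfold lookA at h; rw [dif_pos (by omega)] at h; exact absurd h (by simp)
  | succ n ih =>
    unfold lookA at h
    rw [dif_neg (by omega)] at h
    split at h
    · rename_i hc
      have : k = l := by injection h
      subst this
      exact hc
    · exact ih (k := k+1) h (by omega)

theorem findA_eq_some {cs : List Char} {l : Nat} (m : Nat)
    (h1 : 1 ≤ l) (h2 : l ≤ m) (h3 : cs.take l ∈ knownA)
    (h4 : ∀ k, l < k → k ≤ m → cs.take k ∉ knownA) :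
    findA cs m = some l := by
  induction m with
  | zero => omega
  | succ m ih =>
    unfold findA
    by_cases hc : cs.take (m+1) ∈ knownA
    · rcases Nat.lt_or_ge l (m+1) with hlt | hge
      · exact absurd hc (h4 (m+1) hlt (le_refl _))
      · have : l = m + 1 := by omega
        subst this
        simp [hc]
    · have hlm : l ≤ m := by
        rcases Nat.lt_or_ge l (m+1) with hlt | hge
        · omega
        · have : l = m + 1 := by omega
          subst this
          exact absurd h3 hc
      rw [if_neg hc]
      exact ih hlm (fun k hk hkm => h4 k hk (by omega))

-- the main loop equivalence
theorem loop_eq : ∀ n cs acc, cs.length ≤ n →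
    loopA cs acc = acc.reverse ++ loopB cs := by
  intro n
  induction n with
  | zero =>
    intro cs acc h
    have : cs = [] := List.eq_nil_of_length_eq_zero (by omega)
    subst this
    simp [loopA, loopB]
  | succ n ih =>
    intro cs acc hlen
    by_cases hnil : cs = []
    · subst hnil; simp [loopA, loopB]
    · have hpos : 1 ≤ cs.length := by
        cases cs with
        | nil => simp at hnil
        | cons a t => simp
      cases hb : bestB vocabB none cs with
      | none =>
        -- no vocabulary word prefixes cs: A's findA and lookA both fail
        have hno := bestB_none hb
        have hfind : findA cs (min 15 cs.length) = none := by
          cases hf : findA cs (min 15 cs.length) with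
          | none => rfl
          | some l =>
            have hmem := (findA_some hf).2
            exact absurd (List.take_prefix l cs) (hno _ (mem_knownA_iff.1 hmem))
        have hlook : lookA cs 1 = none := by
          cases hl : lookA cs 1 with
          | none => rfl
          | some j =>
            have hmem := lookA_some hl
            exact absurd (List.take_prefix j cs) (hno _ (mem_knownA_iff.1 hmem))
        rw [loopA_none hnil hfind hlook, loopB_none hnil hb]
        simp
      | some v =>
        obtain ⟨hvm, hvp, hmax⟩ := bestB_some hb
        have hv1 := (vocabB_len v hvm).1
        have hv15 := (vocabB_len v hvm).2
        have hvlen : v.length ≤ cs.length := hvp.length_le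
        have htake : cs.take v.length = v := (List.prefix_iff_eq_take.1 hvp).symm
        have hfind : findA cs (min 15 cs.length) = some v.length := by
          apply findA_eq_some _ hv1 (by omega)
          · rw [htake]; exact mem_knownA_iff.2 hvm
          · intro k hk hkm hmem
            have hp : cs.take k <+: cs := List.take_prefix k cs
            have hl : (cs.take k).length = k := by
              simp only [List.length_take]; omega
            have := hmax _ (mem_knownA_iff.1 hmem) hp
            omega
        rw [loopA_some hnil hfind, htake]
        have hdrop : (cs.drop v.length).length ≤ n := by
          simp only [List.length_drop]; omega
        rw [ih (cs.drop v.length) (String.ofList v :: acc) hdrop]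
        rw [loopB_some hnil hb]
        simp

-- ===== VERDICT (by name: the statement is the Claim_ definition above) =====
theorem tokenize_segment_py_spec : Claim_equal_tokenize_segment_py := by
  intro segment _
  unfold Spec_tokenize_segment_py tokenize_segment_py tokenize_segment_py_alt
  simpa using loop_eq (PySem.Str.upper segment).toList.length _ [] (le_refl _)
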